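-- pv_equiv track=rewrite | github.com/alexandraback/datacollection | solutions_5631989306621952_1/Python/aguy/codejam1.py | f
-- ===== SOURCE A (Python) =====
-- def f(x):
-- 	#find highest letter
-- 	if len(x) == 0:
-- 		return ''
-- 	highestIndex = 0
-- 	highestLetter = x[0]
-- 	for i,c in enumerate(x):
-- 		if c > highestLetter:
-- 			highestLetter = c
-- 			highestIndex = i
--
-- 	beginning = f(x[:i])
-- 	middle = []
-- 	end = []
-- 	for c in x[i:]:
-- 		if c == highestLetter:
-- 			middle.append(c)
-- 		else:
-- 			end.append(c)
-- 	return ''.join(middle) + beginning  + ''.join(end)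
-- ===== SOURCE B (Python) =====
-- def f(x):
--     front = []
--     back = []
--     mx = None
--     for c in x:
--         if mx is None or c >= mx:
--             mx = c
--             front.append(c)
--         else:
--             back.append(c)
--     front.reverse()
--     return ''.join(front) + ''.join(back)
-- ===== Notes on version B (the rewrite author's own statement) =====
-- stated objective: faster
-- what changed: Replaced A's peel-the-last-character recursion (which rescans the whole prefix for its maximum at every level) with a single left-to-right pass maintaining the running maximum and two buckets (running-maxima bucket reversed at the end, others appended in order).
import Mathlib
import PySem

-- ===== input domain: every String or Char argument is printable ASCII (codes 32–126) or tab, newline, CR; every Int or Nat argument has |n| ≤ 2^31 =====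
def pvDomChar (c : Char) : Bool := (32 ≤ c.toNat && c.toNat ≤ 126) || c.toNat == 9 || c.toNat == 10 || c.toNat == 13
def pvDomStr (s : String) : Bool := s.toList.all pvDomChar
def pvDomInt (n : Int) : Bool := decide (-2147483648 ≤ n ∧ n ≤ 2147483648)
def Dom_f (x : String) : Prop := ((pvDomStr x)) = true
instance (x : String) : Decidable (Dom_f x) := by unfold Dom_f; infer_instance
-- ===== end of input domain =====

-- B replaces A's quadratic peel-last-char recursion by one linear pass with a running maximum.

-- ===== PORT A =====
-- A's enumerate loop keeps (highestLetter, highestIndex); note the Python then uses the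
-- leftover loop variable i (= len(x)-1), not highestIndex, so the port does the same.
def fAux (l : List Char) : List Char :=
  if _hnil : l.length = 0 then []
  else
    let st := (PySem.List.enumerate l).foldl
      (fun (p : Char × Int) (ic : Int × Char) => if p.1 < ic.2 then (ic.2, ic.1) else p)
      (l.headD ' ', 0)   -- x[0]; l is nonempty here
    let i := l.length - 1   -- value of the loop variable i after the loop
    let beginning := fAux (l.take i)
    let me := (l.drop i).foldl
      (fun (p : List Char × List Char) c =>
        if c = st.1 then (p.1 ++ [c], p.2) else (p.1, p.2 ++ [c]))
      ([], [])
    me.1 ++ beginning ++ me.2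
termination_by l.length
decreasing_by
  simp only [List.length_take]
  omega

def f (x : String) : String := String.ofList (fAux x.toList)

-- ===== PORT B =====
def stepB (s : List Char × List Char × Option Char) (c : Char) :
    List Char × List Char × Option Char :=
  if (match s.2.2 with | none => true | some m => decide (m ≤ c)) then
    (s.1 ++ [c], s.2.1, some c)
  else
    (s.1, s.2.1 ++ [c], s.2.2)

def f_alt (x : String) : String :=
  let st := x.toList.foldl stepB ([], [], none)
  String.ofList (st.1.reverse ++ st.2.1)

-- ===== PRECONDITION & SPEC =====
def Spec_f (x : String) (out : String) : Prop := out = f_alt x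
instance (x : String) (out : String) : Decidable (Spec_f x out) := by unfold Spec_f; infer_instance

-- ===== CLAIM (what is proved, stated in full; the proofs are below) =====
def Claim_equal_f : Prop := ∀ (x : String), Dom_f x → Spec_f x (f x)

-- ===== LEMMAS AND PROOFS =====

-- the first component of A's enumerate fold is a plain running max over the characters
theorem enumFold_fst (el : List (Int × Char)) (st : Char × Int) :
    ((el.foldl (fun (p : Char × Int) (ic : Int × Char) =>
        if p.1 < ic.2 then (ic.2, ic.1) else p) st).1)
      = (el.map Prod.snd).foldl max st.1 := by
  induction el generalizing st with
  | nil => rfl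
  | cons ic tl ih =>
    simp only [List.foldl, List.map]
    rw [ih]
    by_cases h : st.1 < ic.2
    · simp [h, max_eq_right (le_of_lt h)]
    · simp [h, max_eq_left (le_of_not_gt h)]

theorem foldl_max_self (t : List Char) (d : Char) :
    List.foldl max d (d :: t) = List.foldl max d t := by
  simp [List.foldl, max_self]

-- unfolding of A at the last character
theorem fAux_append (l : List Char) (c : Char) :
    fAux (l ++ [c]) =
      (if (match l with | [] => true | d :: t => decide (t.foldl max d ≤ c)) then
        c :: fAux l else fAux l ++ [c]) := by
  rw [fAux]
  have hlen : (l ++ [c]).length = l.length + 1 := by simp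
  simp only [hlen]
  have hne : ¬ (l.length + 1 = 0) := by omega
  rw [dif_neg hne]
  have htake : (l ++ [c]).take (l.length + 1 - 1) = l := by
    simp
  have hdrop : (l ++ [c]).drop (l.length + 1 - 1) = [c] := by
    simp
  simp only [htake, hdrop]
  have hmax : ((PySem.List.enumerate (l ++ [c])).foldl
      (fun (p : Char × Int) (ic : Int × Char) =>
        if p.1 < ic.2 then (ic.2, ic.1) else p) ((l ++ [c]).headD ' ', 0)).1
      = (l ++ [c]).foldl max ((l ++ [c]).headD ' ') := by
    rw [enumFold_fst, PySem.List.map_snd_enumerate]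
  match l with
  | [] =>
    simp only [List.nil_append] at *
    simp [List.foldl, fAux]
  | d :: t =>
    simp only [List.cons_append, List.headD] at hmax ⊢
    have h1 : ((d :: t) ++ [c]).foldl max d = max (t.foldl max d) c := by
      have := foldl_max_self (t ++ [c]) d
      simp only [List.cons_append] at this ⊢
      rw [this, List.foldl_append]
      rfl
    simp only [List.cons_append] at h1
    rw [h1] at hmax
    simp only [hmax]
    by_cases hc : t.foldl max d ≤ c
    · simp [List.foldl, hc]
    · have hlt : c < t.foldl max d := lt_of_not_ge hc
      have hne2 : c ≠ max (t.foldl max d) c := by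
        rw [max_eq_left (le_of_lt hlt)]
        exact ne_of_lt hlt
      simp [List.foldl, hne2, hc]

-- B's fold invariant: the two buckets assemble A's answer and the third component is the running max
theorem bFold_inv (l : List Char) :
    ((l.foldl stepB ([], [], none)).1.reverse ++ (l.foldl stepB ([], [], none)).2.1 = fAux l) ∧
      (l.foldl stepB ([], [], none)).2.2
        = (match l with | [] => none | d :: t => some (t.foldl max d)) := by
  induction l using List.reverseRecOn with
  | nil => exact ⟨by simp [fAux], rfl⟩
  | append_singleton l c ih =>
    obtain ⟨ih1, ih2⟩ := ih
    rw [List.foldl_append, List.foldl_cons, List.foldl_nil]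
    cases l with
    | nil =>
      refine ⟨?_, by simp [stepB]⟩
      rw [fAux_append]
      simp [stepB, fAux]
    | cons d t =>
      simp only at ih2
      rw [fAux_append]
      by_cases hc : List.foldl max d t ≤ c
      · constructor
        · simp only [stepB, ih2, decide_eq_true_eq]
          simp [hc, ← ih1]
        · simp only [stepB, ih2, decide_eq_true_eq]
          simp only [hc, if_true, List.cons_append, List.foldl_append, List.foldl_cons,
            List.foldl_nil]
          rw [max_eq_right hc]
      · constructor
        · simp only [stepB, ih2, decide_eq_true_eq]
          simp [hc, ← ih1]
        · simp only [stepB, ih2, decide_eq_true_eq]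
          simp only [hc, if_false, List.cons_append, List.foldl_append, List.foldl_cons,
            List.foldl_nil]
          rw [max_eq_left (le_of_not_ge hc)]

-- ===== VERDICT (by name: the statement is the Claim_ definition above) =====
theorem f_spec : Claim_equal_f := by
  intro x _
  unfold Spec_f f f_alt
  show String.ofList (fAux x.toList)
      = String.ofList ((x.toList.foldl stepB ([], [], none)).1.reverse
          ++ (x.toList.foldl stepB ([], [], none)).2.1)
  rw [(bFold_inv x.toList).1]
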